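-- pv_equiv track=rewrite | github.com/krishbindal/jarvis- | brain/autonomy_engine.py | _label_pattern
-- ===== SOURCE A (Python) =====
-- from typing import Dict, List, Optional
--
-- def _label_pattern(seq: List[str]) -> str:
--     joined = " ".join(seq)
--     if "youtube" in joined or "music" in joined or "spotify" in joined:
--         return "entertainment mode"
--     if any(item for item in seq if "code" in item or "terminal" in item or "pycharm" in item):
--         return "dev sprint"
--     if any(item for item in seq if "teams" in item or "zoom" in item or "outlook" in item):
--         return "meeting prep"
--     if any(item for item in seq if "notion" in item or "onenote" in item):
--         return "planning loop"
--     return f"{seq[-1]} focus"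
-- ===== SOURCE B (Python) =====
-- from typing import List
--
-- def _label_pattern(seq: List[str]) -> str:
--     # Single pass: one traversal of seq computes all four group flags at once,
--     # then the label is picked from the flags (A joins + makes up to four scans).
--     ent = dev = meet = plan = False
--     for item in seq:
--         ent = ent or "youtube" in item or "music" in item or "spotify" in item
--         dev = dev or "code" in item or "terminal" in item or "pycharm" in item
--         meet = meet or "teams" in item or "zoom" in item or "outlook" in item
--         plan = plan or "notion" in item or "onenote" in item
--     if ent:
--         return "entertainment mode"
--     if dev:
--         return "dev sprint"
--     if meet:
--         return "meeting prep"
--     if plan: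
--         return "planning loop"
--     return f"{seq[-1]} focus"
-- ===== Notes on version B (the rewrite author's own statement) =====
-- stated objective: alternative
-- what changed: A joins the list and then makes up to four staged scans (one on the joined string, three filtered any() passes); B makes a SINGLE pass over seq with a four-flag accumulator that records per item which keyword groups matched, then selects the label from the flags after the loop -- no join, no repeated traversals.
-- outside the precondition, e.g. on _label_pattern([]): A raises IndexError, B raises IndexError
import Mathlib
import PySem

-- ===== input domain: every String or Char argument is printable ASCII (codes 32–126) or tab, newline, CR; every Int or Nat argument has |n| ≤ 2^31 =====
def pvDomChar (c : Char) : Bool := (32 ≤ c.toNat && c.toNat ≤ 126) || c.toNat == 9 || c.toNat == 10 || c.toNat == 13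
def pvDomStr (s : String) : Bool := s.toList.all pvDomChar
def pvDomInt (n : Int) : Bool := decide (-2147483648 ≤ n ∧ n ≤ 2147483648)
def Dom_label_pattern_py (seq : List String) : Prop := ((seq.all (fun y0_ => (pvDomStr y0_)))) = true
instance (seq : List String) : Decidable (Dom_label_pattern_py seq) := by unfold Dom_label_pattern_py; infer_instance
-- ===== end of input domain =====

-- B replaces A's join plus up to four staged scans by ONE pass over seq with a four-flag
-- accumulator, then picks the label from the flags (objective: alternative decomposition).

-- ===== PORT A =====
def label_pattern_py (seq : List String) : String :=
  let joined := PySem.Str.join " " seq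
  if PySem.Str.isIn "youtube" joined || PySem.Str.isIn "music" joined || PySem.Str.isIn "spotify" joined then
    "entertainment mode"
  else if seq.any (fun item =>
      (PySem.Str.isIn "code" item || PySem.Str.isIn "terminal" item || PySem.Str.isIn "pycharm" item)
      && item != "") then
    "dev sprint"
  else if seq.any (fun item =>
      (PySem.Str.isIn "teams" item || PySem.Str.isIn "zoom" item || PySem.Str.isIn "outlook" item)
      && item != "") then
    "meeting prep"
  else if seq.any (fun item =>
      (PySem.Str.isIn "notion" item || PySem.Str.isIn "onenote" item)
      && item != "") then
    "planning loop"
  else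
    match PySem.List.pyGet? seq (-1) with   -- seq[-1]; none = IndexError, excluded by Pre_
    | some last => last ++ " focus"
    | none => ""

-- ===== PORT B =====
-- the single pass of Source B: fold over seq carrying the four flags (ent, dev, meet, plan)
def pvScan (seq : List String) : Bool × Bool × Bool × Bool :=
  seq.foldl (fun f item =>
    (f.1 || PySem.Str.isIn "youtube" item || PySem.Str.isIn "music" item || PySem.Str.isIn "spotify" item,
     f.2.1 || PySem.Str.isIn "code" item || PySem.Str.isIn "terminal" item || PySem.Str.isIn "pycharm" item,
     f.2.2.1 || PySem.Str.isIn "teams" item || PySem.Str.isIn "zoom" item || PySem.Str.isIn "outlook" item,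
     f.2.2.2 || PySem.Str.isIn "notion" item || PySem.Str.isIn "onenote" item))
    (false, false, false, false)

def label_pattern_py_alt (seq : List String) : String :=
  let f := pvScan seq
  if f.1 then "entertainment mode"
  else if f.2.1 then "dev sprint"
  else if f.2.2.1 then "meeting prep"
  else if f.2.2.2 then "planning loop"
  else
    match PySem.List.pyGet? seq (-1) with   -- seq[-1]; none = IndexError, excluded by Pre_
    | some last => last ++ " focus"
    | none => ""

-- ===== PRECONDITION & SPEC =====
-- Pre_ excludes only the empty list, on which the Python A (and B) raises IndexError at seq[-1].
def Pre_label_pattern_py (seq : List String) : Prop := seq ≠ []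
instance (seq : List String) : Decidable (Pre_label_pattern_py seq) := by unfold Pre_label_pattern_py; infer_instance
def pvWitness_label_pattern_py : List String := (["code review"])

def Spec_label_pattern_py (seq : List String) (out : String) : Prop := out = label_pattern_py_alt seq
instance (seq : List String) (out : String) : Decidable (Spec_label_pattern_py seq out) := by unfold Spec_label_pattern_py; infer_instance

-- ===== CLAIM (what is proved, stated in full; the proofs are below) =====
def Claim_equal_label_pattern_py : Prop := ∀ (seq : List String), Dom_label_pattern_py seq → Pre_label_pattern_py seq → Spec_label_pattern_py seq (label_pattern_py seq)

-- ===== LEMMAS AND PROOFS =====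

-- A pattern avoiding c is a prefix of u ++ c :: v iff it is a prefix of u.
lemma prefix_append_cons_iff {α : Type} (sub u v : List α) (c : α) (hc : c ∉ sub) :
    sub <+: u ++ c :: v ↔ sub <+: u := by
  constructor
  · intro h
    by_cases hlen : sub.length ≤ u.length
    · exact List.prefix_of_prefix_length_le h (List.prefix_append u (c :: v)) hlen
    · exfalso
      apply hc
      have hul : u.length < sub.length := by omega
      have hget := List.IsPrefix.getElem h (i := u.length) hul
      have hcv : (u ++ c :: v)[u.length]'(by simp) = c := by simp
      have : sub[u.length]'hul = c := hget.trans hcv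
      exact this ▸ List.getElem_mem hul
  · intro h
    exact h.trans (List.prefix_append u (c :: v))

-- A pattern avoiding c is an infix of u ++ c :: v iff it is an infix of u or of v.
lemma infix_append_cons_iff {α : Type} (sub u v : List α) (c : α) (hc : c ∉ sub) :
    sub <:+: u ++ c :: v ↔ sub <:+: u ∨ sub <:+: v := by
  induction u with
  | nil =>
    simp only [List.nil_append, List.infix_cons_iff]
    have hp : sub <+: c :: v ↔ sub <+: ([] : List α) :=
      prefix_append_cons_iff sub [] v c hc
    simp only [hp]
    constructor
    · rintro (h | h)
      · left; exact h.isInfix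
      · right; exact h
    · rintro (h | h)
      · left
        have := List.sublist_nil.mp h.sublist
        simp [this]
      · right; exact h
  | cons x u' ih =>
    constructor
    · intro h
      rw [List.cons_append, List.infix_cons_iff] at h
      rcases h with h | h
      · rw [← List.cons_append, prefix_append_cons_iff sub (x :: u') v c hc] at h
        exact Or.inl h.isInfix
      · rcases ih.mp h with h | h
        · exact Or.inl (List.infix_cons h)
        · exact Or.inr h
    · rintro (h | h)
      · exact h.trans (List.prefix_append (x :: u') (c :: v)).isInfix
      · rw [List.cons_append, List.infix_cons_iff]
        exact Or.inr (ih.mpr (Or.inr h))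

-- A nonempty, space-free keyword occurs in " ".join(xs) iff it occurs in some element.
lemma isIn_join_iff (kw : List Char) (hne : kw ≠ []) (hsp : (' ' : Char) ∉ kw)
    (xs : List (List Char)) :
    PySem.Chars.isIn kw (PySem.Chars.join [' '] xs) = true ↔ ∃ x ∈ xs, PySem.Chars.isIn kw x = true := by
  induction xs with
  | nil =>
    simp only [PySem.Chars.join_nil, PySem.Chars.isIn_iff_infix]
    constructor
    · intro h; exact absurd (List.sublist_nil.mp h.sublist) hne
    · rintro ⟨x, hx, -⟩; exact absurd hx (by simp)
  | cons x rest ih =>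
    cases rest with
    | nil =>
      simp [PySem.Chars.join_singleton]
    | cons y rest' =>
      rw [PySem.Chars.join_cons_cons]
      have hshape : x ++ [' '] ++ PySem.Chars.join [' '] (y :: rest')
          = x ++ ' ' :: PySem.Chars.join [' '] (y :: rest') := by simp
      rw [hshape]
      simp only [PySem.Chars.isIn_iff_infix] at *
      rw [infix_append_cons_iff kw x _ ' ' hsp]
      constructor
      · rintro (h | h)
        · exact ⟨x, by simp, h⟩
        · obtain ⟨z, hz, hz2⟩ := ih.mp h
          exact ⟨z, by simp [hz], hz2⟩
      · rintro ⟨z, hz, hz2⟩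
        rcases List.mem_cons.mp hz with rfl | hz
        · exact Or.inl hz2
        · exact Or.inr (ih.mpr ⟨z, hz, hz2⟩)

-- A nonempty keyword never occurs in the empty string.
lemma ne_empty_of_isIn (kw : String) (hne : kw.toList ≠ []) (item : String)
    (h : PySem.Str.isIn kw item = true) : (item != "") = true := by
  simp only [bne_iff_ne, ne_eq]
  intro hempty
  subst hempty
  rw [PySem.Str.isIn_eq, PySem.Chars.isIn_iff_infix] at h
  exact hne (by simpa using List.sublist_nil.mp h.sublist)

-- Str-level form of isIn_join_iff.
lemma str_isIn_join_iff (kw : String) (hne : kw.toList ≠ []) (hsp : (' ' : Char) ∉ kw.toList)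
    (seq : List String) :
    PySem.Str.isIn kw (PySem.Str.join " " seq) = true ↔ ∃ x ∈ seq, PySem.Str.isIn kw x = true := by
  rw [PySem.Str.isIn_eq, PySem.Str.toList_join]
  have hsep : (" " : String).toList = [' '] := by decide
  rw [hsep, isIn_join_iff kw.toList hne hsp]
  constructor
  · rintro ⟨xl, hxl, h⟩
    obtain ⟨x, hx, rfl⟩ := List.mem_map.mp hxl
    exact ⟨x, hx, by rw [PySem.Str.isIn_eq]; exact h⟩
  · rintro ⟨x, hx, h⟩
    exact ⟨x.toList, List.mem_map.mpr ⟨x, hx, rfl⟩, by rw [PySem.Str.isIn_eq] at h; exact h⟩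

-- A's test on the joined string equals the per-item disjunction over seq.
lemma joined_eq_any (seq : List String) :
    (PySem.Str.isIn "youtube" (PySem.Str.join " " seq) || PySem.Str.isIn "music" (PySem.Str.join " " seq)
      || PySem.Str.isIn "spotify" (PySem.Str.join " " seq))
    = seq.any (fun item => PySem.Str.isIn "youtube" item || PySem.Str.isIn "music" item
        || PySem.Str.isIn "spotify" item) := by
  rw [Bool.eq_iff_iff]
  simp only [Bool.or_eq_true, List.any_eq_true,
    str_isIn_join_iff "youtube" (by decide) (by decide) seq,
    str_isIn_join_iff "music" (by decide) (by decide) seq,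
    str_isIn_join_iff "spotify" (by decide) (by decide) seq]
  constructor
  · rintro ((⟨x, hx, h⟩ | ⟨x, hx, h⟩) | ⟨x, hx, h⟩)
    · exact ⟨x, hx, Or.inl (Or.inl h)⟩
    · exact ⟨x, hx, Or.inl (Or.inr h)⟩
    · exact ⟨x, hx, Or.inr h⟩
  · rintro ⟨x, hx, (h | h) | h⟩
    · exact Or.inl (Or.inl ⟨x, hx, h⟩)
    · exact Or.inl (Or.inr ⟨x, hx, h⟩)
    · exact Or.inr ⟨x, hx, h⟩

-- A's truthiness filter 'item != ""' is redundant whenever g only fires on nonempty items.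
lemma any_and_ne (seq : List String) (g : String → Bool)
    (hg : ∀ x, g x = true → (x != "") = true) :
    seq.any (fun item => g item && item != "") = seq.any g := by
  rw [Bool.eq_iff_iff]
  simp only [List.any_eq_true, Bool.and_eq_true]
  exact ⟨fun ⟨x, hx, h, _⟩ => ⟨x, hx, h⟩, fun ⟨x, hx, h⟩ => ⟨x, hx, h, hg x h⟩⟩

-- The single pass computes exactly the four group-wise 'any' flags.
lemma pvScan_eq (seq : List String) :
    pvScan seq =
      (seq.any (fun item => PySem.Str.isIn "youtube" item || PySem.Str.isIn "music" item
          || PySem.Str.isIn "spotify" item),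
       seq.any (fun item => PySem.Str.isIn "code" item || PySem.Str.isIn "terminal" item
          || PySem.Str.isIn "pycharm" item),
       seq.any (fun item => PySem.Str.isIn "teams" item || PySem.Str.isIn "zoom" item
          || PySem.Str.isIn "outlook" item),
       seq.any (fun item => PySem.Str.isIn "notion" item || PySem.Str.isIn "onenote" item)) := by
  unfold pvScan
  suffices h : ∀ (f : Bool × Bool × Bool × Bool),
      seq.foldl (fun f item =>
        (f.1 || PySem.Str.isIn "youtube" item || PySem.Str.isIn "music" item || PySem.Str.isIn "spotify" item,
         f.2.1 || PySem.Str.isIn "code" item || PySem.Str.isIn "terminal" item || PySem.Str.isIn "pycharm" item,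
         f.2.2.1 || PySem.Str.isIn "teams" item || PySem.Str.isIn "zoom" item || PySem.Str.isIn "outlook" item,
         f.2.2.2 || PySem.Str.isIn "notion" item || PySem.Str.isIn "onenote" item)) f =
      (f.1 || seq.any (fun item => PySem.Str.isIn "youtube" item || PySem.Str.isIn "music" item
          || PySem.Str.isIn "spotify" item),
       f.2.1 || seq.any (fun item => PySem.Str.isIn "code" item || PySem.Str.isIn "terminal" item
          || PySem.Str.isIn "pycharm" item),
       f.2.2.1 || seq.any (fun item => PySem.Str.isIn "teams" item || PySem.Str.isIn "zoom" item
          || PySem.Str.isIn "outlook" item),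
       f.2.2.2 || seq.any (fun item => PySem.Str.isIn "notion" item || PySem.Str.isIn "onenote" item)) by
    simpa using h (false, false, false, false)
  induction seq with
  | nil => intro f; simp
  | cons x xs ih =>
    intro f
    simp only [List.foldl_cons, List.any_cons, ih]
    simp [Bool.or_assoc]

-- ===== VERDICT (by name: the statement is the Claim_ definition above) =====
theorem label_pattern_py_spec : Claim_equal_label_pattern_py := by
  intro seq _ _
  unfold Spec_label_pattern_py label_pattern_py label_pattern_py_alt
  rw [pvScan_eq]
  simp only [joined_eq_any seq,
    any_and_ne seq _ (fun x hx => by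
      rcases Bool.or_eq_true .. |>.mp hx with h | h
      · rcases Bool.or_eq_true .. |>.mp h with h | h
        · exact ne_empty_of_isIn "code" (by decide) x h
        · exact ne_empty_of_isIn "terminal" (by decide) x h
      · exact ne_empty_of_isIn "pycharm" (by decide) x h),
    any_and_ne seq _ (fun x hx => by
      rcases Bool.or_eq_true .. |>.mp hx with h | h
      · rcases Bool.or_eq_true .. |>.mp h with h | h
        · exact ne_empty_of_isIn "teams" (by decide) x h
        · exact ne_empty_of_isIn "zoom" (by decide) x h
      · exact ne_empty_of_isIn "outlook" (by decide) x h),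
    any_and_ne seq _ (fun x hx => by
      rcases Bool.or_eq_true .. |>.mp hx with h | h
      · exact ne_empty_of_isIn "notion" (by decide) x h
      · exact ne_empty_of_isIn "onenote" (by decide) x h)]
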